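-- pv_equiv track=rewrite | github.com/ImFlashh/clear-code | hack_power.py | hack_calculator
-- ===== SOURCE A (Python) =====
-- def hack_calculator(hack, letters, phrases):
--     result = 0
--     multiply = {}  # słownik do zapisywania ilości wystąpień litery w hack
--     try:
--         for letter in hack:
--             multiply.setdefault(letter, 0)
--             if letter in multiply:
--                 multiply[letter] += 1
--             result += letters[letter] * multiply[letter]
--
--         phrases_sorted = sorted(phrases, reverse=True)  # posortowane 'bonusy' wg wartości malejąco
--         for phrase in phrases_sorted:
--             if phrase in hack:
--                 result += phrases[phrase] * hack.count(phrase)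
--                 hack = hack.replace(phrase, '')  # wycinam bonusy, które już wystąpiły
--
--         return result
--     except KeyError:
--         return 0
-- ===== SOURCE B (Python) =====
-- def hack_calculator(hack, letters, phrases):
--     # Phase 1 rewritten: tally each distinct letter once, then use the
--     # triangular-number closed form for the running-multiplier total.
--     counts = {}
--     for ch in hack:
--         counts[ch] = counts.get(ch, 0) + 1
--     result = 0
--     for ch, c in counts.items():
--         if ch not in letters:
--             return 0  # A raises KeyError here and returns 0
--         result += letters[ch] * (c * (c + 1) // 2)
--     # Phase 2 kept as in A: the replace-based removal is order-dependent.
--     for phrase in sorted(phrases, reverse=True):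
--         if phrase in hack:
--             result += phrases[phrase] * hack.count(phrase)
--             hack = hack.replace(phrase, '')
--     return result
-- ===== Notes on version B (the rewrite author's own statement) =====
-- stated objective: alternative
-- what changed: Phase 1's running-multiplier accumulation over every character is replaced by a single tally pass plus a closed-form triangular-number sum over the distinct letters (missing letter checked explicitly instead of via KeyError); the order-dependent phrase loop is kept.
import Mathlib
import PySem

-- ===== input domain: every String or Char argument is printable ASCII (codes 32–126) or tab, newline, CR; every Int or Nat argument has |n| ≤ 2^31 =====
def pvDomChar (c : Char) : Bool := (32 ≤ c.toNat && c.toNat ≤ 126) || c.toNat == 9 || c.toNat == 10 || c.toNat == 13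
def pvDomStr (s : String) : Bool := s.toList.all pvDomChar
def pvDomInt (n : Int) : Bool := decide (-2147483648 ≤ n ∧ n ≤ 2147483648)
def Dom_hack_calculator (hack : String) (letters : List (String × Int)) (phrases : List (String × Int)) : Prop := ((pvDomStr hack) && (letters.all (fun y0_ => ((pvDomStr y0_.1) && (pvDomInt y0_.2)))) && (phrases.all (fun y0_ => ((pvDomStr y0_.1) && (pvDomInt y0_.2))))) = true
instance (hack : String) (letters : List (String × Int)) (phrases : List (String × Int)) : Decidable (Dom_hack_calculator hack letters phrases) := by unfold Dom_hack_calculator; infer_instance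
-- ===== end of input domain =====

-- B rewrites phase 1 (per-character running-multiplier accumulation) into a tally pass plus a
-- closed-form triangular-number sum over the distinct letters; the order-dependent phrase loop is kept.

-- Iterating a Python str yields its characters as 1-character strings.
def pvCharsOf (hack : String) : List String := hack.toList.map (fun c => String.ofList [c])

-- The phrase-bonus loop (textually identical in A and in B, so shared by both ports):
-- 'for phrase in phrases_sorted: if phrase in hack: result += phrases[phrase] * hack.count(phrase);
--  hack = hack.replace(phrase, "")'   (none = KeyError, caught by the surrounding try)
def pvPhraseLoop (phrases : PySem.Dict String Int) : List String → String → Int → Option Int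
  | [], _, result => some result
  | p :: rest, hack, result =>
    if PySem.Str.isIn p hack then
      match phrases.get? p with
      | none => none
      | some v =>
        pvPhraseLoop phrases rest (PySem.Str.replace hack p "")
          (result + v * (PySem.Str.count hack p : Int))
    else pvPhraseLoop phrases rest hack result

-- ===== PORT A =====
-- 'for letter in hack: multiply.setdefault(letter, 0); if letter in multiply: multiply[letter] += 1;
--  result += letters[letter] * multiply[letter]'   (none = KeyError, caught: return 0)
def pvA_letterLoop (letters : PySem.Dict String Int) :
    List String → Int → PySem.Dict String Int → Option Int
  | [], result, _ => some result
  | x :: rest, result, multiply =>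
    let m1 := multiply.setdefault x 0
    let m2 := if m1.contains x then m1.modify x 0 (· + 1) else m1
    match letters.get? x with
    | none => none
    | some v =>
      match m2.get? x with
      | none => none
      | some cnt => pvA_letterLoop letters rest (result + v * cnt) m2

def hack_calculator (hack : String) (letters : List (String × Int)) (phrases : List (String × Int)) : Int :=
  let L := PySem.Dict.ofList letters
  let P := PySem.Dict.ofList phrases
  match pvA_letterLoop L (pvCharsOf hack) 0 PySem.Dict.empty with
  | none => 0   -- except KeyError: return 0
  | some result =>
    match pvPhraseLoop P (PySem.List.sorted P.keys (fun k => k) true) hack result with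
    | none => 0
    | some r => r

-- ===== PORT B =====
-- 'for ch, c in counts.items(): if ch not in letters: return 0; result += letters[ch] * (c*(c+1)//2)'
def pvB_sumLoop (letters : PySem.Dict String Int) : List (String × Int) → Int → Option Int
  | [], result => some result
  | (s, c) :: rest, result =>
    if letters.contains s then
      pvB_sumLoop letters rest
        (result + letters.getD s 0 * PySem.Int.floordiv (c * (c + 1)) 2)
    else none   -- 'return 0'

def hack_calculator_alt (hack : String) (letters : List (String × Int)) (phrases : List (String × Int)) : Int :=
  let L := PySem.Dict.ofList letters
  let P := PySem.Dict.ofList phrases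
  -- 'counts = {}; for ch in hack: counts[ch] = counts.get(ch, 0) + 1'
  let counts := (pvCharsOf hack).foldl (fun d x => d.insert x (d.getD x 0 + 1)) PySem.Dict.empty
  match pvB_sumLoop L counts.items 0 with
  | none => 0
  | some result =>
    match pvPhraseLoop P (PySem.List.sorted P.keys (fun k => k) true) hack result with
    | none => 0
    | some r => r

-- ===== PRECONDITION & SPEC =====
def Spec_hack_calculator (hack : String) (letters : List (String × Int)) (phrases : List (String × Int)) (out : Int) : Prop := out = hack_calculator_alt hack letters phrases
instance (hack : String) (letters : List (String × Int)) (phrases : List (String × Int)) (out : Int) : Decidable (Spec_hack_calculator hack letters phrases out) := by unfold Spec_hack_calculator; infer_instance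

-- ===== CLAIM (what is proved, stated in full; the proofs are below) =====
def Claim_equal_hack_calculator : Prop := ∀ (hack : String) (letters : List (String × Int)) (phrases : List (String × Int)), Dom_hack_calculator hack letters phrases → Spec_hack_calculator hack letters phrases (hack_calculator hack letters phrases)

-- ===== LEMMAS AND PROOFS =====

-- Abstraction of A's letter loop: the multiply dict replaced by its count function.
def pvAbs (L : PySem.Dict String Int) : List String → Int → (String → Int) → Option Int
  | [], r, _ => some r
  | x :: rest, r, f =>
    match L.get? x with
    | none => none
    | some v => pvAbs L rest (r + v * (f x + 1)) (fun s => if s = x then f x + 1 else f s)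

-- the triangular term c*(c+1)//2
def pvTri (c : Int) : Int := PySem.Int.floordiv (c * (c + 1)) 2

-- 'all distinct letters of xs have a value' and the grouped closed-form total
def pvCond (L : PySem.Dict String Int) (xs : List String) : Bool :=
  (PySem.Set.ofList xs).all (fun k => L.contains k)

def pvS (L : PySem.Dict String Int) (xs : List String) : Int :=
  ((PySem.Set.ofList xs).map (fun k => L.getD k 0 * pvTri ((xs.count k : Int)))).sum

theorem pvTri_succ (c : Int) : pvTri (c + 1) = pvTri c + (c + 1) := by
  obtain ⟨m, hm⟩ := Int.even_mul_succ_self c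
  have h1 : c * (c + 1) = 2 * m := by rw [hm]; ring
  have h2 : (c + 1) * ((c + 1) + 1) = 2 * (m + c + 1) := by
    have : (c + 1) * ((c + 1) + 1) = c * (c + 1) + 2 * (c + 1) := by ring
    rw [this, h1]; ring
  unfold pvTri PySem.Int.floordiv
  rw [h1, h2, Int.mul_fdiv_cancel_left _ (by norm_num), Int.mul_fdiv_cancel_left _ (by norm_num)]
  ring

theorem pvA_eq_abs (L : PySem.Dict String Int) (xs : List String) :
    ∀ (r : Int) (m : PySem.Dict String Int),
      pvA_letterLoop L xs r m = pvAbs L xs r (fun s => m.getD s 0) := by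
  induction xs with
  | nil => intro r m; rfl
  | cons x rest ih =>
    intro r m
    have hc1 : (m.setdefault x 0).contains x = true := by
      rw [PySem.Dict.contains_setdefault]; simp
    have hfold : ∀ (d : PySem.Dict String Int),
        ([x].foldl (fun d y => d.modify y 0 (fun z => z + 1)) d) = d.modify x 0 (fun z => z + 1) := by
      intro d; rfl
    have hgd : ((m.setdefault x 0).modify x 0 (fun z => z + 1)).getD x 0 = m.getD x 0 + 1 := by
      rw [← hfold, PySem.Dict.getD_foldl_modify_add_one, PySem.Dict.getD_setdefault_self]
      simp
    have hcm : ((m.setdefault x 0).modify x 0 (fun z => z + 1)).contains x = true := by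
      rw [PySem.Dict.contains_modify]; simp
    have hget : ((m.setdefault x 0).modify x 0 (fun z => z + 1)).get? x = some (m.getD x 0 + 1) := by
      rw [PySem.Dict.contains_eq_isSome_get?] at hcm
      cases hg : ((m.setdefault x 0).modify x 0 (fun z => z + 1)).get? x with
      | none => rw [hg] at hcm; simp at hcm
      | some w =>
        have := PySem.Dict.getD_of_get?_eq_some (d := (m.setdefault x 0).modify x 0 (fun z => z + 1)) 0 hg
        rw [hgd] at this; rw [this]
    have harg : (fun s => ((m.setdefault x 0).modify x 0 (fun z => z + 1)).getD s 0)
        = (fun s => if s = x then m.getD x 0 + 1 else m.getD s 0) := by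
      funext s
      by_cases hs : s = x
      · subst hs; rw [hgd]; simp
      · rw [← hfold, PySem.Dict.getD_foldl_modify_add_one]
        have hbeq : (x == s) = false := beq_eq_false_iff_ne.mpr (Ne.symm hs)
        have hcnt : List.count s [x] = 0 := by simp [List.count_cons, hbeq]
        rw [hcnt, PySem.Dict.getD_eq_get?_getD, PySem.Dict.get?_setdefault_of_ne _ _ hs,
          ← PySem.Dict.getD_eq_get?_getD, if_neg hs]
        simp
    simp only [pvA_letterLoop, pvAbs, hc1, if_true]
    cases hL : L.get? x with
    | none => rfl
    | some v =>
      simp only [hget, ih, harg]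

theorem pvAbs_append (L : PySem.Dict String Int) (xs : List String) :
    ∀ (ys : List String) (r : Int) (f : String → Int),
      pvAbs L (xs ++ ys) r f =
        match pvAbs L xs r f with
        | none => none
        | some r' => pvAbs L ys r' (fun s => f s + (xs.count s : Int)) := by
  induction xs with
  | nil =>
    intro ys r f
    have : (fun s => f s + (([] : List String).count s : Int)) = f := by
      funext s; simp
    simp [pvAbs]
  | cons x rest ih =>
    intro ys r f
    simp only [List.cons_append, pvAbs]
    have harg : (fun s => (if s = x then f x + 1 else f s) + (rest.count s : Int))
        = (fun s => f s + (((x :: rest).count s : Int))) := by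
      funext s
      by_cases hs : s = x
      · subst hs
        simp
        omega
      · have hbeq : (x == s) = false := beq_eq_false_iff_ne.mpr (Ne.symm hs)
        have : (x :: rest).count s = rest.count s := by
          simp [List.count_cons, hbeq]
        rw [this]; simp [hs]
    cases hL : L.get? x with
    | none => rfl
    | some v => simp only [ih, harg]

theorem pvB_closed (L : PySem.Dict String Int) (l : List (String × Int)) :
    ∀ (r : Int),
      pvB_sumLoop L l r =
        if l.all (fun p => L.contains p.1) then
          some (r + (l.map (fun p => L.getD p.1 0 * pvTri p.2)).sum)
        else none := by
  induction l with
  | nil => intro r; simp [pvB_sumLoop]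
  | cons hd tl ih =>
    intro r
    obtain ⟨s, c⟩ := hd
    simp only [pvB_sumLoop, List.all_cons, List.map_cons, List.sum_cons]
    by_cases hc : L.contains s
    · rw [if_pos hc, ih]
      simp only [hc, Bool.true_and, pvTri]
      split_ifs with h
      · congr 1; ring
      · rfl
    · rw [if_neg hc]
      simp [hc]

theorem pvB_counter (L : PySem.Dict String Int) (xs : List String) (r : Int) :
    pvB_sumLoop L (PySem.Dict.counter xs).items r =
      if pvCond L xs then some (r + pvS L xs) else none := by
  rw [pvB_closed, PySem.Dict.items_counter]
  unfold pvCond pvS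
  simp [List.all_map, List.map_map, Function.comp_def]

theorem pvSum_update (ds : List String) :
    ∀ (x : String), ds.Nodup → x ∈ ds → ∀ (F G : String → Int),
      (∀ k, k ≠ x → F k = G k) →
      (ds.map G).sum = (ds.map F).sum + (G x - F x) := by
  induction ds with
  | nil => intro x _ hx; exact absurd hx (List.not_mem_nil)
  | cons d ds ih =>
    intro x hnd hx F G hFG
    rcases List.mem_cons.mp hx with h | h
    · subst h
      have hnot : x ∉ ds := (List.nodup_cons.mp hnd).1
      have : ds.map G = ds.map F := by
        apply List.map_congr_left
        intro k hk
        exact (hFG k (fun he => hnot (he ▸ hk))).symm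
      simp only [List.map_cons, List.sum_cons, this]
      ring
    · have hdx : d ≠ x := by
        intro he; exact (List.nodup_cons.mp hnd).1 (he ▸ h)
      have hF : F d = G d := hFG d hdx
      simp only [List.map_cons, List.sum_cons, ih x (List.nodup_cons.mp hnd).2 h F G hFG, hF]
      ring

theorem pvS_append (L : PySem.Dict String Int) (xs : List String) (x : String) :
    pvS L (xs ++ [x]) = pvS L xs + L.getD x 0 * ((xs.count x : Int) + 1) := by
  have hcount_ne : ∀ k, k ≠ x → (xs ++ [x]).count k = xs.count k := by
    intro k hk
    rw [List.count_append]
    have hbeq : (x == k) = false := beq_eq_false_iff_ne.mpr (Ne.symm hk)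
    have : List.count k [x] = 0 := by simp [List.count_cons, hbeq]
    omega
  have hcount_x : ((xs ++ [x]).count x : Int) = (xs.count x : Int) + 1 := by
    rw [List.count_append]; simp
  by_cases hx : x ∈ xs
  · have hofl : PySem.Set.ofList (xs ++ [x]) = PySem.Set.ofList xs := by
      rw [PySem.Set.ofList_append_singleton,
        PySem.Set.add_of_mem ((PySem.Set.mem_ofList xs x).mpr hx)]
    unfold pvS
    rw [hofl]
    rw [pvSum_update (PySem.Set.ofList xs) x (PySem.Set.nodup_ofList xs)
      ((PySem.Set.mem_ofList xs x).mpr hx)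
      (fun k => L.getD k 0 * pvTri ((xs.count k : Int)))
      (fun k => L.getD k 0 * pvTri (((xs ++ [x]).count k : Int)))
      (by intro k hk; simp only [hcount_ne k hk])]
    rw [hcount_x, pvTri_succ]
    ring
  · have hofl : PySem.Set.ofList (xs ++ [x]) = PySem.Set.ofList xs ++ [x] := by
      rw [PySem.Set.ofList_append_singleton]
      exact PySem.Set.add_of_not_mem (fun hmem => hx ((PySem.Set.mem_ofList xs x).mp hmem))
    unfold pvS
    rw [hofl, List.map_append, List.sum_append]
    have h1 : (PySem.Set.ofList xs).map (fun k => L.getD k 0 * pvTri (((xs ++ [x]).count k : Int)))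
        = (PySem.Set.ofList xs).map (fun k => L.getD k 0 * pvTri ((xs.count k : Int))) := by
      apply List.map_congr_left
      intro k hk
      have hkx : k ≠ x := fun he => hx (he ▸ (PySem.Set.mem_ofList xs k).mp hk)
      rw [hcount_ne k hkx]
    have h2 : ((xs ++ [x]).count x : Int) = 1 := by
      rw [hcount_x]
      have : xs.count x = 0 := List.count_eq_zero.mpr hx
      rw [this]; simp
    have h3 : (xs.count x : Int) = 0 := by
      have : xs.count x = 0 := List.count_eq_zero.mpr hx
      rw [this]; simp
    have ht1 : pvTri 1 = 1 := by decide
    rw [h1]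
    simp only [List.map_cons, List.map_nil, List.sum_cons, List.sum_nil, h2, h3, ht1]
    ring

theorem pvCond_mono (L : PySem.Dict String Int) (xs : List String) (x : String)
    (h : pvCond L xs = false) : pvCond L (xs ++ [x]) = false := by
  unfold pvCond at *
  rw [← Bool.not_eq_true, List.all_eq_true] at h ⊢
  intro hall
  apply h
  intro k hk
  exact hall k ((PySem.Set.mem_ofList _ k).mpr (List.mem_append_left _ ((PySem.Set.mem_ofList xs k).mp hk)))

theorem pvCond_append_of_not (L : PySem.Dict String Int) (xs : List String) (x : String)
    (h : L.contains x = false) : pvCond L (xs ++ [x]) = false := by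
  unfold pvCond
  rw [← Bool.not_eq_true, List.all_eq_true]
  intro hall
  have := hall x ((PySem.Set.mem_ofList _ x).mpr (List.mem_append_right _ (List.mem_singleton.mpr rfl)))
  rw [h] at this; exact absurd this (by simp)

theorem pvCond_append_of_yes (L : PySem.Dict String Int) (xs : List String) (x : String)
    (h1 : pvCond L xs = true) (h2 : L.contains x = true) : pvCond L (xs ++ [x]) = true := by
  unfold pvCond at *
  rw [List.all_eq_true] at h1 ⊢
  intro k hk
  rcases List.mem_append.mp ((PySem.Set.mem_ofList _ k).mp hk) with h | h
  · exact h1 k ((PySem.Set.mem_ofList xs k).mpr h)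
  · rw [List.mem_singleton.mp h]; exact h2

theorem pvMainAux (L : PySem.Dict String Int) (xs : List String) :
    ∀ (r : Int), pvAbs L xs r (fun _ => 0) =
      if pvCond L xs then some (r + pvS L xs) else none := by
  induction xs using List.reverseRecOn with
  | nil =>
    intro r
    simp [pvAbs, pvCond, pvS, PySem.Set.ofList_nil]
  | append_singleton xs x ih =>
    intro r
    rw [pvAbs_append, ih r]
    by_cases hok : pvCond L xs
    · rw [if_pos hok]
      simp only [pvAbs]
      cases hL : L.get? x with
      | none =>
        have hnc : L.contains x = false := by
          rw [PySem.Dict.contains_eq_isSome_get?, hL]; rfl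
        rw [pvCond_append_of_not L xs x hnc]; rfl
      | some v =>
        have hcx : L.contains x = true := by
          rw [PySem.Dict.contains_eq_isSome_get?, hL]; rfl
        rw [pvCond_append_of_yes L xs x hok hcx]
        simp only [if_true]
        have hv : L.getD x 0 = v := PySem.Dict.getD_of_get?_eq_some (d := L) 0 hL
        rw [pvS_append, hv]
        congr 1
        ring
    · rw [if_neg hok]
      rw [pvCond_mono L xs x (by simpa using hok)]
      rfl

theorem pvMain (L : PySem.Dict String Int) (xs : List String) (r : Int) :
    pvAbs L xs r (fun _ => 0) = pvB_sumLoop L (PySem.Dict.counter xs).items r := by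
  rw [pvMainAux, pvB_counter]

theorem pvEmptyCount :
    (fun s => (PySem.Dict.empty : PySem.Dict String Int).getD s 0) = (fun _ => (0 : Int)) := by
  funext s; rw [PySem.Dict.getD_empty]

-- ===== VERDICT (by name: the statement is the Claim_ definition above) =====
theorem hack_calculator_spec : Claim_equal_hack_calculator := by
  intro hack letters phrases _hdom
  unfold Spec_hack_calculator hack_calculator hack_calculator_alt
  simp only [PySem.Dict.foldl_insert_getD_add_one_eq_counter, pvA_eq_abs, pvEmptyCount, pvMain]
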